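-- pv_equiv track=rewrite | github.com/yjhoon2/Coding_test | Programmers/Level3/N으로_표현.py | solution
-- ===== SOURCE A (Python) =====
-- def solution(N, number):
--     memo = []
--     for i in range(1, 9):
--         case = set()
--         case.add(int(str(N)*i))
--         for j in range(i-1):
--             for a in memo[j]:
--                 for b in memo[-j-1]:
--                     case.add(a + b)
--                     case.add(a - b)
--                     case.add(a * b)
--                     if b != 0:
--                         case.add(a // b)
--         if number in case:
--             return i
--         memo.append(case)
--     else:
--         return -1
-- ===== SOURCE B (Python) =====
-- def solution(N, number):
--     memo = {}
--
--     def reach(c):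
--         if c in memo:
--             return memo[c]
--         s = {int(str(N) * c)}
--         for j in range(1, c):
--             for a in reach(j):
--                 for b in reach(c - j):
--                     s.add(a + b)
--                     s.add(a - b)
--                     s.add(a * b)
--                     if b != 0:
--                         s.add(a // b)
--         memo[c] = s
--         return s
--
--     return next((i for i in range(1, 9) if number in reach(i)), -1)
-- ===== Notes on version B (the rewrite author's own statement) =====
-- stated objective: alternative
-- what changed: Replaces the bottom-up memo-list DP with negative-index lookups by a memoized top-down recursion reach(c) over the count, with the driver reduced to next((i for i in range(1,9) if number in reach(i)), -1).
import Mathlib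
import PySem

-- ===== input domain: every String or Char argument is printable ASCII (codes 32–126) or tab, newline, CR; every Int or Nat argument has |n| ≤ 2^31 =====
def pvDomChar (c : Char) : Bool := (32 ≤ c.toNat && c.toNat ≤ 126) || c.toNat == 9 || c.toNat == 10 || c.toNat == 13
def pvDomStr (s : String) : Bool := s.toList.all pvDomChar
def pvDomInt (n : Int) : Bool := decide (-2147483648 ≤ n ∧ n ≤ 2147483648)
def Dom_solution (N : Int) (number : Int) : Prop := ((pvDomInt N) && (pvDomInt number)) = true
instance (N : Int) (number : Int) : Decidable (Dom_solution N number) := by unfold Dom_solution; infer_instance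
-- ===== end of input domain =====

-- B re-implements A's bottom-up DP table as a fuel-memoized top-down recursion over the count; same values, no speed claim.
-- Python's int sets are realized as Std.HashSet Int in BOTH ports (exact for membership/insert; the returned Int never
-- depends on a set's iteration order, both ports iterate the provably identical sets in the same order).

-- int(str(N)*c); the default 0 is reached only when the parse fails (N < 0 and c ≥ 2),
-- which Pre_solution excludes (Python raises ValueError there).
def pvConcat (N : Int) (c : Int) : Int :=
  (PySem.Int.ofChars? (PySem.List.pyRepeat (PySem.Int.toChars N) c)).getD 0

-- ===== PORT A =====
-- the body of A's outer loop: build `case` for count i from the memo list (negative index memo[-j-1] as in the source)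
def pvACase (N : Int) (i : Int) (memo : List (Std.HashSet Int)) : Std.HashSet Int :=
  (PySem.List.pyRange 0 (i - 1) 1).foldl
    (fun case j =>
      ((PySem.List.pyGetD memo j ∅).toList).foldl
        (fun case a =>
          ((PySem.List.pyGetD memo (-j - 1) ∅).toList).foldl
            (fun case b =>
              let case := Std.HashSet.insert case (a + b)
              let case := Std.HashSet.insert case (a - b)
              let case := Std.HashSet.insert case (a * b)
              if b ≠ 0 then Std.HashSet.insert case (PySem.Int.floordiv a b) else case)
            case)
        case)
    ((∅ : Std.HashSet Int).insert (pvConcat N i))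

-- A's loop 'for i in range(1, 9)' with early return and memo.append(case)
def pvALoop (N : Int) (number : Int) : List Int → List (Std.HashSet Int) → Int
  | [], _ => -1
  | i :: rest, memo =>
    let case := pvACase N i memo
    if case.contains number then i else pvALoop N number rest (memo ++ [case])

def solution (N : Int) (number : Int) : Int :=
  pvALoop N number (PySem.List.pyRange 1 9 1) []

-- ===== PORT B =====
-- B's memoized recursive reach(c), encoded with a structural fuel (the memo dict only caches; fuel ≥ c reproduces it exactly)
def pvReachF (N : Int) : Nat → Int → Std.HashSet Int
  | 0, c => (∅ : Std.HashSet Int).insert (pvConcat N c)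
  | fuel + 1, c =>
    (PySem.List.pyRange 1 c 1).foldl
      (fun s j =>
        (pvReachF N fuel j).toList.foldl
          (fun s a =>
            (pvReachF N fuel (c - j)).toList.foldl
              (fun s b =>
                let s := Std.HashSet.insert s (a + b)
                let s := Std.HashSet.insert s (a - b)
                let s := Std.HashSet.insert s (a * b)
                if b ≠ 0 then Std.HashSet.insert s (PySem.Int.floordiv a b) else s)
              s)
          s)
      ((∅ : Std.HashSet Int).insert (pvConcat N c))

def pvReach (N : Int) (c : Int) : Std.HashSet Int := pvReachF N c.toNat c

-- next((i for i in range(1, 9) if number in reach(i)), -1)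
def pvAltLoop (N : Int) (number : Int) : List Int → Int
  | [] => -1
  | i :: rest => if (pvReach N i).contains number then i else pvAltLoop N number rest

def solution_alt (N : Int) (number : Int) : Int :=
  pvAltLoop N number (PySem.List.pyRange 1 9 1)

-- ===== PRECONDITION & SPEC =====
-- Pre_ excludes exactly the inputs on which Python A raises ValueError (N < 0 with number ≠ N:
-- int(str(N)*2) = int("-3-3") fails); Python B raises there too. It excludes nothing A returns on.
def Pre_solution (N : Int) (number : Int) : Prop := 0 ≤ N ∨ number = N
instance (N : Int) (number : Int) : Decidable (Pre_solution N number) := by unfold Pre_solution; infer_instance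
def pvWitness_solution : Int × Int := (2, 11)
def Spec_solution (N : Int) (number : Int) (out : Int) : Prop := out = solution_alt N number
instance (N : Int) (number : Int) (out : Int) : Decidable (Spec_solution N number out) := by unfold Spec_solution; infer_instance

-- ===== CLAIM (what is proved, stated in full; the proofs are below) =====
def Claim_equal_solution : Prop := ∀ (N : Int) (number : Int), Dom_solution N number → Pre_solution N number → Spec_solution N number (solution N number)

-- ===== LEMMAS AND PROOFS =====

-- the memo list A has built after k completed iterations, expressed through B's reach
def pvMemo (N : Int) (k : Nat) : List (Std.HashSet Int) :=
  (List.range k).map (fun (j : Nat) => pvReach N ((j : Int) + 1))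

-- the fuel is irrelevant as soon as it dominates the count
theorem pvReachF_fuel (N : Int) : ∀ (f1 f2 : Nat) (c : Int),
    c ≤ (f1 : Int) + 1 → c ≤ (f2 : Int) + 1 → pvReachF N f1 c = pvReachF N f2 c := by
  intro f1
  induction f1 with
  | zero =>
    intro f2 c h1 h2
    cases f2 with
    | zero => rfl
    | succ g =>
      simp only [pvReachF]
      rw [PySem.List.pyRange_one_eq_nil (by exact_mod_cast h1)]
      simp
  | succ f ih =>
    intro f2 c h1 h2
    cases f2 with
    | zero =>
      simp only [pvReachF]
      rw [PySem.List.pyRange_one_eq_nil (by exact_mod_cast h2)]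
      simp
    | succ g =>
      push_cast at h1 h2
      simp only [pvReachF]
      apply PySem.List.foldl_congr_mem
      intro s j hj
      rw [PySem.List.mem_pyRange_one] at hj
      rw [ih g j (by omega) (by omega), ih g (c - j) (by omega) (by omega)]

theorem pvMemo_length (N : Int) (k : Nat) : (pvMemo N k).length = k := by
  simp [pvMemo]

-- reach N c with any fuel ≥ c - 1
theorem pvReach_eq_reachF (N : Int) (f : Nat) (c : Int) (h0 : 0 ≤ c) (h : c ≤ (f : Int) + 1) :
    pvReach N c = pvReachF N f c := by
  unfold pvReach
  exact pvReachF_fuel N c.toNat f c (by omega) h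

-- A's `case` at count k+1, built from the memo, is B's reach (k+1)
theorem pvCase_eq (N : Int) (k : Nat) :
    pvACase N ((k : Int) + 1) (pvMemo N k) = pvReach N ((k : Int) + 1) := by
  unfold pvACase
  rw [pvReach_eq_reachF N (k + 1) ((k : Int) + 1) (by omega) (by omega)]
  simp only [pvReachF]
  have h1 : ((k : Int) + 1 - 1) = (k : Int) := by ring
  rw [h1, PySem.List.pyRange_one 0 (k : Int), PySem.List.pyRange_one 1 ((k : Int) + 1)]
  have h2 : ((k : Int) - 0).toNat = k := by omega
  have h3 : ((k : Int) + 1 - 1).toNat = k := by omega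
  rw [h2, h3, List.foldl_map, List.foldl_map]
  apply PySem.List.foldl_congr_mem
  intro s t ht
  rw [List.mem_range] at ht
  have e0 : (0 : Int) + (t : Int) = ((t : Nat) : Int) := by ring
  rw [e0, PySem.List.pyGetD_natCast]
  have eg : (pvMemo N k).getD t ∅ = pvReach N ((t : Int) + 1) := by
    unfold pvMemo
    exact PySem.List.getD_map_range _ k t _ ht
  rw [eg]
  have en : -((t : Nat) : Int) - 1 = -(((t + 1 : Nat) : Int)) := by push_cast; ring
  rw [en, PySem.List.pyGetD_neg_natCast (pvMemo N k) (t + 1) ∅ (by omega)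
        (by rw [pvMemo_length]; omega)]
  have eg2 : (pvMemo N k)[(pvMemo N k).length - (t + 1)]'(by rw [pvMemo_length]; omega)
      = pvReach N ((((k - (t + 1) : Nat)) : Int) + 1) := by
    simp [pvMemo]
  rw [eg2]
  have b1 : (1 : Int) + (t : Int) = (t : Int) + 1 := by ring
  have b2 : (k : Int) + 1 - ((t : Int) + 1) = (((k - (t + 1) : Nat)) : Int) + 1 := by omega
  rw [b1, b2,
    pvReach_eq_reachF N k ((t : Int) + 1) (by omega) (by omega),
    pvReach_eq_reachF N k ((((k - (t + 1) : Nat)) : Int) + 1) (by omega) (by omega)]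

-- both loops agree from any point k (0 ≤ k ≤ 8) onwards
theorem pvLoop_eq (N number : Int) : ∀ (n k : Nat), k + n = 8 →
    pvALoop N number (PySem.List.pyRange ((k : Int) + 1) 9) (pvMemo N k)
      = pvAltLoop N number (PySem.List.pyRange ((k : Int) + 1) 9) := by
  intro n
  induction n with
  | zero =>
    intro k hk
    rw [PySem.List.pyRange_one_eq_nil (by omega)]
    rfl
  | succ m ih =>
    intro k hk
    rw [PySem.List.pyRange_one_cons (by omega : (k : Int) + 1 < 9)]
    simp only [pvALoop, pvAltLoop, pvCase_eq N k]
    by_cases h : (pvReach N ((k : Int) + 1)).contains number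
    · simp [h]
    · rw [if_neg (by simp [h])]
      rw [if_neg (by simp [h])]
      have hm : pvMemo N k ++ [pvReach N ((k : Int) + 1)] = pvMemo N (k + 1) := by
        unfold pvMemo
        rw [List.range_succ, List.map_append]
        simp
      have hr : (k : Int) + 1 + 1 = (((k + 1 : Nat)) : Int) + 1 := by push_cast; ring
      rw [hm, hr]
      exact ih (k + 1) (by omega)

-- ===== VERDICT (by name: the statement is the Claim_ definition above) =====
theorem solution_spec : Claim_equal_solution := by
  intro N number _ _
  unfold Spec_solution solution solution_alt
  have h := pvLoop_eq N number 8 0 (by omega)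
  simpa [pvMemo] using h
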